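-- pv_equiv track=rewrite | github.com/peanute123/some-template-of-leetcode | 单调栈.py | dandiaozhan
-- ===== SOURCE A (Python) =====
-- def dandiaozhan(arr):
--     stack = []
--     n = len(arr)
--     prevBiggerIndex = [-1]*n
--     nextBiggerIndex = [n]*n
--     for i,num in enumerate(arr):
--         while stack and arr[ stack[-1] ]< arr[i]:
--             if len( stack )>1:
--                 prevBiggerIndex[ stack[-1] ] = stack[-2]
--             nextBiggerIndex[ stack[-1] ] = i
--             stack.pop(-1)
--         stack.append(i)
--     while stack:
--         if len( stack )>1:
--             prevBiggerIndex[ stack[-1] ] = stack[-2]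
--         stack.pop(-1)
--     return prevBiggerIndex,nextBiggerIndex
-- ===== SOURCE B (Python) =====
-- def dandiaozhan(arr):
--     n = len(arr)
--     prevBiggerIndex = [next((j for j in range(i - 1, -1, -1) if arr[j] >= arr[i]), -1)
--                        for i in range(n)]
--     nextBiggerIndex = [next((j for j in range(i + 1, n) if arr[j] > arr[i]), n)
--                        for i in range(n)]
--     return prevBiggerIndex, nextBiggerIndex
-- ===== Notes on version B (the rewrite author's own statement) =====
-- stated objective: simpler
-- what changed: The fused monotonic-stack pass (which discovers both neighbours at pop time and in a final drain) is replaced by a direct per-index definition: two comprehensions that scan left for the nearest index with value >= arr[i] and right for the nearest index with value > arr[i].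
import Mathlib
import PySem

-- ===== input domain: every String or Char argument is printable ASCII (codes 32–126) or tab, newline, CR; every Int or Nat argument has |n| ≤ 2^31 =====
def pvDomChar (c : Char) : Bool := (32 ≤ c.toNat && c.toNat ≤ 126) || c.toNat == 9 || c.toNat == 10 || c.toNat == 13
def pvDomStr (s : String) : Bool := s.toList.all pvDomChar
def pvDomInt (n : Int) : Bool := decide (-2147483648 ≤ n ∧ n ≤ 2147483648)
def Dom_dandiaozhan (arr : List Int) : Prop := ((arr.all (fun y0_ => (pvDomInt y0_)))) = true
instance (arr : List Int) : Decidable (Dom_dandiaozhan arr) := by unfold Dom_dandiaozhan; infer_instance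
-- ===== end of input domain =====

-- B replaces A's fused monotonic-stack pass by two direct per-index nearest-neighbour scans
-- (simpler decomposition, not faster: O(n^2) instead of O(n)). Return values agree on all inputs.

-- ===== PORT A =====
-- The stack holds list indices, which are always in range, so it is a List Nat with its top at
-- the HEAD (Python appends/pops at the end); arr[j] for such an index is arr.getD j 0 (exact:
-- the index is always valid when Python evaluates it).
-- The inner 'while stack and arr[stack[-1]] < arr[i]: …' loop of A:
def popA (arr : List Int) (i : Nat) :
    List Nat → List Int → List Int → List Nat × List Int × List Int
  | [], prev, next => ([], prev, next)
  | t :: rest, prev, next =>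
    if arr.getD t 0 < arr.getD i 0 then
      let prev' := match rest with
        | s :: _ => prev.set t (s : Int)   -- 'if len(stack)>1: prevBiggerIndex[stack[-1]] = stack[-2]'
        | [] => prev
      popA arr i rest prev' (next.set t (i : Int))
    else (t :: rest, prev, next)

-- The final 'while stack: …' drain loop of A:
def drainA : List Nat → List Int → List Int
  | [], prev => prev
  | t :: rest, prev =>
    drainA rest (match rest with | s :: _ => prev.set t (s : Int) | [] => prev)

-- one iteration of the main 'for i,num in enumerate(arr)' loop body
def stepA (arr : List Int) (st : List Nat × List Int × List Int) (i : Nat) :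
    List Nat × List Int × List Int :=
  let stack' := popA arr i st.1 st.2.1 st.2.2
  (i :: stack'.1, stack'.2.1, stack'.2.2)

def dandiaozhan (arr : List Int) : List Int × List Int :=
  let n := arr.length
  let st := (List.range n).foldl (stepA arr)
    ([], List.replicate n (-1 : Int), List.replicate n (n : Int))
  (drainA st.1 st.2.1, st.2.2)

-- ===== PORT B =====
-- 'next((j for j in range(i-1,-1,-1) if arr[j] >= arr[i]), -1)' : first hit of a descending scan
def prevIdxB (arr : List Int) (i : Nat) : Int :=
  match (List.range i).reverse.find? (fun j => decide (arr.getD i 0 ≤ arr.getD j 0)) with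
  | some j => (j : Int)
  | none => -1

-- 'next((j for j in range(i+1,n) if arr[j] > arr[i]), n)' : first hit of an ascending scan
def nextIdxB (arr : List Int) (i : Nat) : Int :=
  match (List.range' (i + 1) (arr.length - (i + 1))).find?
      (fun j => decide (arr.getD i 0 < arr.getD j 0)) with
  | some j => (j : Int)
  | none => (arr.length : Int)

def dandiaozhan_alt (arr : List Int) : List Int × List Int :=
  ((List.range arr.length).map (prevIdxB arr), (List.range arr.length).map (nextIdxB arr))

-- ===== PRECONDITION & SPEC =====
def Spec_dandiaozhan (arr : List Int) (out : List Int × List Int) : Prop := out = dandiaozhan_alt arr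
instance (arr : List Int) (out : List Int × List Int) : Decidable (Spec_dandiaozhan arr out) := by unfold Spec_dandiaozhan; infer_instance

-- ===== CLAIM (what is proved, stated in full; the proofs are below) =====
def Claim_equal_dandiaozhan : Prop := ∀ (arr : List Int), Dom_dandiaozhan arr → Spec_dandiaozhan arr (dandiaozhan arr)

-- ===== LEMMAS AND PROOFS =====

-- 'j survives all of arr[j+1 .. i-1]': index j would still be on A's stack after processing arr[0..i).
@[reducible] def keepP (arr : List Int) (i j : Nat) : Prop :=
  ∀ k, k < i → j < k → arr.getD k 0 ≤ arr.getD j 0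

-- A's stack (bottom to top) after processing arr[0..i).
def filt (arr : List Int) (i : Nat) : List Nat :=
  (List.range i).filter (fun j => decide (keepP arr i j))

lemma mem_filt {arr : List Int} {i j : Nat} :
    j ∈ filt arr i ↔ j < i ∧ keepP arr i j := by
  simp [filt, List.mem_filter, List.mem_range]

lemma filt_pairwise (arr : List Int) (i : Nat) : (filt arr i).Pairwise (· < ·) :=
  (List.pairwise_lt_range).filter _

lemma keep_top (arr : List Int) (i : Nat) : keepP arr (i + 1) i := by
  intro k h1 h2; omega

lemma keep_succ {arr : List Int} {i j : Nat} (hj : j < i) :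
    keepP arr (i + 1) j ↔ keepP arr i j ∧ arr.getD i 0 ≤ arr.getD j 0 := by
  constructor
  · intro h
    exact ⟨fun k hk hjk => h k (by omega) hjk, h i (by omega) hj⟩
  · rintro ⟨h1, h2⟩ k hk hjk
    rcases Nat.lt_or_ge k i with hki | hki
    · exact h1 k hki hjk
    · have : k = i := by omega
      subst this; exact h2

lemma filt_succ (arr : List Int) (i : Nat) :
    filt arr (i + 1) =
      (filt arr i).filter (fun j => decide (arr.getD i 0 ≤ arr.getD j 0)) ++ [i] := by
  unfold filt
  rw [List.range_succ, List.filter_append, List.filter_filter]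
  congr 1
  · apply List.filter_congr
    intro j hj
    have hj' : j < i := List.mem_range.mp hj
    simp only [decide_eq_true_eq, keep_succ hj', Bool.decide_and]
    rw [Bool.and_comm]
  · simp only [List.filter_cons, List.filter_nil]
    rw [if_pos (by simpa using keep_top arr i)]

-- values are non-increasing along filt (by index order)
lemma filt_value_le {arr : List Int} {i s t : Nat}
    (hs : s ∈ filt arr i) (ht : t ∈ filt arr i) (hst : s < t) :
    arr.getD t 0 ≤ arr.getD s 0 := by
  rcases mem_filt.mp hs with ⟨_, hks⟩
  rcases mem_filt.mp ht with ⟨hti, _⟩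
  exact hks t hti hst

-- climbing lemma: if some k < j has value ≥ arr[j], some k' ≥ k below j survives to time i
lemma climb {arr : List Int} {i j : Nat} (hkj : keepP arr i j) (hj : j < i) :
    ∀ d k, j - k ≤ d → k < j → arr.getD j 0 ≤ arr.getD k 0 →
      ∃ k', k ≤ k' ∧ k' < j ∧ keepP arr i k' := by
  intro d
  induction d with
  | zero => intro k h1 h2 _; omega
  | succ d ih =>
    intro k _ hkj' hval
    by_cases hex : ∃ m, m < j ∧ k < m ∧ arr.getD j 0 ≤ arr.getD m 0
    · rcases hex with ⟨m, hm1, hm2, hm3⟩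
      rcases ih m (by omega) hm1 hm3 with ⟨k', h1, h2, h3⟩
      exact ⟨k', by omega, h2, h3⟩
    · push_neg at hex
      refine ⟨k, le_refl _, hkj', ?_⟩
      intro m hm hkm
      rcases Nat.lt_or_ge m j with hmj | hmj
      · exact le_trans (le_of_lt (hex m hmj hkm)) hval
      · rcases Nat.eq_or_lt_of_le hmj with h | h
        · subst h; exact hval
        · exact le_trans (hkj m hm h) hval

-- characterisation of B's descending scan
lemma prevIdxB_eq_some {arr : List Int} {j s : Nat}
    (hs : s < j) (hval : arr.getD j 0 ≤ arr.getD s 0)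
    (hbet : ∀ k, s < k → k < j → arr.getD k 0 < arr.getD j 0) :
    prevIdxB arr j = (s : Int) := by
  unfold prevIdxB
  have : ∀ m, s < m → m ≤ j →
      (List.range m).reverse.find? (fun x => decide (arr.getD j 0 ≤ arr.getD x 0)) = some s := by
    intro m
    induction m with
    | zero => intro h; omega
    | succ m ih =>
      intro h1 h2
      rw [List.range_succ, List.reverse_append, List.reverse_singleton,
        List.singleton_append]
      rcases Nat.eq_or_lt_of_le (Nat.succ_le_of_lt h1) with he | hlt
      · have hms : m = s := by omega
        subst hms
        rw [List.find?_cons_of_pos (by simp only [decide_eq_true_eq]; exact hval)]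
      · have hms : s < m := by omega
        have : arr.getD m 0 < arr.getD j 0 := hbet m hms (by omega)
        rw [List.find?_cons_of_neg (by simpa using this)]
        exact ih hms (by omega)
  rw [this j hs (le_refl j)]

lemma prevIdxB_eq_none {arr : List Int} {j : Nat}
    (hbet : ∀ k, k < j → arr.getD k 0 < arr.getD j 0) :
    prevIdxB arr j = -1 := by
  unfold prevIdxB
  have : ∀ m, m ≤ j →
      (List.range m).reverse.find? (fun x => decide (arr.getD j 0 ≤ arr.getD x 0)) = none := by
    intro m
    induction m with
    | zero => intro _; simp
    | succ m ih =>
      intro h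
      rw [List.range_succ, List.reverse_append, List.reverse_singleton,
        List.singleton_append]
      have := hbet m (by omega)
      rw [List.find?_cons_of_neg (by simpa using this)]
      exact ih (by omega)
  rw [this j (le_refl j)]

-- characterisation of B's ascending scan
lemma nextIdxB_eq_some {arr : List Int} {j i : Nat}
    (hj : j < i) (hi : i < arr.length)
    (hval : arr.getD j 0 < arr.getD i 0)
    (hbet : ∀ k, j < k → k < i → arr.getD k 0 ≤ arr.getD j 0) :
    nextIdxB arr j = (i : Int) := by
  unfold nextIdxB
  have : ∀ b a, j < a → a ≤ i → a + b = arr.length →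
      (List.range' a b).find? (fun x => decide (arr.getD j 0 < arr.getD x 0)) = some i := by
    intro b
    induction b with
    | zero => intro a h1 h2 h3; omega
    | succ b ih =>
      intro a h1 h2 h3
      rw [List.range'_succ]
      rcases Nat.eq_or_lt_of_le h2 with he | hlt
      · subst he
        rw [List.find?_cons_of_pos (by simp only [decide_eq_true_eq]; exact hval)]
      · have : arr.getD a 0 ≤ arr.getD j 0 := hbet a h1 hlt
        rw [List.find?_cons_of_neg (by simpa using this)]
        exact ih (a + 1) (by omega) (by omega) (by omega)
  rw [this (arr.length - (j + 1)) (j + 1) (by omega) (by omega) (by omega)]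

lemma nextIdxB_eq_none {arr : List Int} {j : Nat} (hj : j < arr.length)
    (hbet : ∀ k, j < k → k < arr.length → arr.getD k 0 ≤ arr.getD j 0) :
    nextIdxB arr j = (arr.length : Int) := by
  unfold nextIdxB
  have : ∀ b a, j < a → a + b = arr.length →
      (List.range' a b).find? (fun x => decide (arr.getD j 0 < arr.getD x 0)) = none := by
    intro b
    induction b with
    | zero => intro a _ _; simp
    | succ b ih =>
      intro a h1 h3
      rw [List.range'_succ]
      have : arr.getD a 0 ≤ arr.getD j 0 := hbet a h1 (by omega)
      rw [List.find?_cons_of_neg (by simpa using this)]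
      exact ih (a + 1) (by omega) (by omega)
  rw [this (arr.length - (j + 1)) (j + 1) (by omega) (by omega)]

-- setting an entry of a range-map
lemma set_range_map {n t : Nat} (f : Nat → Int) (v : Int) (ht : t < n) :
    ((List.range n).map f).set t v =
      (List.range n).map (fun j => if j = t then v else f j) := by
  apply List.ext_getElem
  · simp
  · intro k h1 h2
    simp only [List.getElem_set, List.getElem_map, List.getElem_range] at *
    by_cases h : t = k <;> simp [h] <;> simp [Ne.symm h]

lemma range_map_congr {n : Nat} {f g : Nat → Int} (h : ∀ j, j < n → f j = g j) :
    (List.range n).map f = (List.range n).map g :=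
  List.map_congr_left (fun j hj => h j (List.mem_range.mp hj))

-- no element of a (<)-pairwise list lies strictly between two adjacent entries
lemma no_between {L l₁ l₂ : List Nat} {s t k : Nat}
    (hp : L.Pairwise (· < ·)) (hL : L = l₁ ++ s :: t :: l₂) (hk : k ∈ L) :
    ¬(s < k ∧ k < t) := by
  rintro ⟨h1, h2⟩
  subst hL
  rw [List.pairwise_append] at hp
  rcases hp with ⟨_, hp2, hcross⟩
  rw [List.mem_append] at hk
  rcases hk with hk | hk
  · have := hcross k hk s (by simp); omega
  · rcases List.pairwise_cons.mp hp2 with ⟨hs, hp3⟩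
    rcases List.mem_cons.mp hk with rfl | hk
    · omega
    · rcases List.pairwise_cons.mp hp3 with ⟨htl, _⟩
      rcases List.mem_cons.mp hk with rfl | hk
      · omega
      · have := htl k hk; omega

-- prev value A writes for a popped element with a neighbour below on the stack
lemma prevIdxB_adjacent {arr : List Int} {i s t : Nat} {l₁ l₂ : List Nat}
    (hL : filt arr i = l₁ ++ s :: t :: l₂) :
    prevIdxB arr t = (s : Int) := by
  have hs : s ∈ filt arr i := by rw [hL]; simp
  have ht : t ∈ filt arr i := by rw [hL]; simp
  rcases mem_filt.mp hs with ⟨hsi, hks⟩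
  rcases mem_filt.mp ht with ⟨hti, hkt⟩
  have hst : s < t := by
    have := filt_pairwise arr i
    rw [hL, List.pairwise_append] at this
    rcases this with ⟨_, hp2, _⟩
    rcases List.pairwise_cons.mp hp2 with ⟨hall, _⟩
    exact hall t (by simp)
  refine prevIdxB_eq_some hst (hks t hti hst) ?_
  intro k hk1 hk2
  by_contra hge
  push_neg at hge
  rcases climb hkt hti (t - k) k (le_refl _) hk2 hge with ⟨k', h1, h2, h3⟩
  exact no_between (filt_pairwise arr i) hL (mem_filt.mpr ⟨by omega, h3⟩) ⟨by omega, h2⟩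

-- prev value for the bottom element of the stack
lemma prevIdxB_bottom {arr : List Int} {i t : Nat} {l₂ : List Nat}
    (hL : filt arr i = t :: l₂) :
    prevIdxB arr t = -1 := by
  have ht : t ∈ filt arr i := by rw [hL]; simp
  rcases mem_filt.mp ht with ⟨hti, hkt⟩
  apply prevIdxB_eq_none
  intro k hk
  by_contra hge
  push_neg at hge
  rcases climb hkt hti (t - k) k (le_refl _) hk hge with ⟨k', _, h2, h3⟩
  have hk' : k' ∈ filt arr i := mem_filt.mpr ⟨by omega, h3⟩
  rw [hL] at hk'
  rcases List.mem_cons.mp hk' with rfl | hk'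
  · omega
  · have := filt_pairwise arr i
    rw [hL] at this
    rcases List.pairwise_cons.mp this with ⟨hall, _⟩
    have := hall k' hk'; omega

-- the two invariant array shapes
def prevMid (arr : List Int) (i : Nat) (l₂ : List Nat) : List Int :=
  (List.range arr.length).map
    (fun j => if (j < i ∧ ¬ keepP arr i j) ∨ j ∈ l₂ then prevIdxB arr j else -1)

def nextMid (arr : List Int) (i : Nat) (l₂ : List Nat) : List Int :=
  (List.range arr.length).map
    (fun j => if (j < i ∧ ¬ keepP arr i j) ∨ j ∈ l₂ then nextIdxB arr j else (arr.length : Int))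

lemma filt_nodup (arr : List Int) (i : Nat) : (filt arr i).Nodup :=
  (List.nodup_range).filter _

-- if the top of the stack survives the comparison with arr[i], so does everything below it
lemma stay_all {arr : List Int} {i t : Nat} {rest l₂ : List Nat}
    (hL : filt arr i = (t :: rest).reverse ++ l₂)
    (ht : arr.getD i 0 ≤ arr.getD t 0) :
    ∀ x ∈ (t :: rest).reverse, arr.getD i 0 ≤ arr.getD x 0 := by
  intro x hx
  have hxf : x ∈ filt arr i := by rw [hL]; exact List.mem_append_left _ hx
  have htf : t ∈ filt arr i := by rw [hL]; apply List.mem_append_left; simp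
  rw [List.reverse_cons] at hx
  rcases List.mem_append.mp hx with hx | hx
  · have hxt : x < t := by
      have hp := filt_pairwise arr i
      rw [hL, List.reverse_cons, List.append_assoc] at hp
      rcases List.pairwise_append.mp hp with ⟨_, _, hcross⟩
      exact hcross x hx t (by simp)
    exact le_trans ht (filt_value_le hxf htf hxt)
  · have hxt : x = t := by simpa using hx
    subst hxt
    exact ht

-- once the pop loop stops, the already-set region is exactly 'popped before time i+1'
lemma cond_final {arr : List Int} {i : Nat} {stack l₂ : List Nat}
    (hL : filt arr i = stack.reverse ++ l₂)
    (hpop : ∀ x ∈ l₂, arr.getD x 0 < arr.getD i 0)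
    (hstay : ∀ x ∈ stack.reverse, arr.getD i 0 ≤ arr.getD x 0)
    (j : Nat) :
    ((j < i ∧ ¬ keepP arr i j) ∨ j ∈ l₂) ↔
      ((j < i + 1 ∧ ¬ keepP arr (i + 1) j) ∨ j ∈ ([] : List Nat)) := by
  rw [or_iff_left (by simp : ¬ j ∈ ([] : List Nat))]
  constructor
  · rintro (⟨h1, h2⟩ | hmem)
    · exact ⟨by omega, fun h => h2 (fun k hk hjk => h k (by omega) hjk)⟩
    · have hjf : j ∈ filt arr i := by rw [hL]; exact List.mem_append_right _ hmem
      rcases mem_filt.mp hjf with ⟨h1, h2⟩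
      refine ⟨by omega, fun h => ?_⟩
      have hle := ((keep_succ h1).mp h).2
      have := hpop j hmem
      omega
  · rintro ⟨h1, h2⟩
    rcases Nat.lt_or_ge j i with hji | hji
    · by_cases hk : keepP arr i j
      · have hv : ¬ arr.getD i 0 ≤ arr.getD j 0 :=
          fun hv => h2 ((keep_succ hji).mpr ⟨hk, hv⟩)
        have hjf : j ∈ filt arr i := mem_filt.mpr ⟨hji, hk⟩
        rw [hL, List.mem_append] at hjf
        rcases hjf with hjf | hjf
        · exact absurd (hstay j hjf) hv
        · exact Or.inr hjf
      · exact Or.inl ⟨hji, hk⟩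
    · exfalso
      have hj : j = i := by omega
      exact h2 (by rw [hj]; exact keep_top arr i)

lemma filter_final {arr : List Int} {i : Nat} {stack l₂ : List Nat}
    (hL : filt arr i = stack.reverse ++ l₂)
    (hpop : ∀ x ∈ l₂, arr.getD x 0 < arr.getD i 0)
    (hstay : ∀ x ∈ stack.reverse, arr.getD i 0 ≤ arr.getD x 0) :
    (filt arr i).filter (fun j => decide (arr.getD i 0 ≤ arr.getD j 0)) = stack.reverse := by
  rw [hL, List.filter_append,
    List.filter_eq_self.mpr (fun x hx => by simpa using hstay x hx),
    List.filter_eq_nil_iff.mpr (fun x hx => by simpa using not_le.mpr (hpop x hx)),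
    List.append_nil]

lemma prevMid_final {arr : List Int} {i : Nat} {stack l₂ : List Nat}
    (hL : filt arr i = stack.reverse ++ l₂)
    (hpop : ∀ x ∈ l₂, arr.getD x 0 < arr.getD i 0)
    (hstay : ∀ x ∈ stack.reverse, arr.getD i 0 ≤ arr.getD x 0) :
    prevMid arr i l₂ = prevMid arr (i + 1) [] := by
  unfold prevMid
  exact range_map_congr (fun j _ => if_congr (cond_final hL hpop hstay j) rfl rfl)

lemma nextMid_final {arr : List Int} {i : Nat} {stack l₂ : List Nat}
    (hL : filt arr i = stack.reverse ++ l₂)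
    (hpop : ∀ x ∈ l₂, arr.getD x 0 < arr.getD i 0)
    (hstay : ∀ x ∈ stack.reverse, arr.getD i 0 ≤ arr.getD x 0) :
    nextMid arr i l₂ = nextMid arr (i + 1) [] := by
  unfold nextMid
  exact range_map_congr (fun j _ => if_congr (cond_final hL hpop hstay j) rfl rfl)

lemma cond_cons {j t : Nat} {l₂ : List Nat} (C : Prop) (hjt : j ≠ t) :
    (C ∨ j ∈ l₂) ↔ (C ∨ j ∈ t :: l₂) := by
  constructor
  · rintro (h | h)
    · exact Or.inl h
    · exact Or.inr (List.mem_cons_of_mem _ h)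
  · rintro (h | h)
    · exact Or.inl h
    · rcases List.mem_cons.mp h with rfl | h
      · exact absurd rfl hjt
      · exact Or.inr h

lemma popA_spec {arr : List Int} {i : Nat} (hi : i < arr.length) :
    ∀ (stack : List Nat) (l₂ : List Nat),
      filt arr i = stack.reverse ++ l₂ →
      (∀ x ∈ l₂, arr.getD x 0 < arr.getD i 0) →
      popA arr i stack (prevMid arr i l₂) (nextMid arr i l₂) =
        (((filt arr i).filter (fun j => decide (arr.getD i 0 ≤ arr.getD j 0))).reverse,
          prevMid arr (i + 1) [], nextMid arr (i + 1) []) := by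
  intro stack
  induction stack with
  | nil =>
    intro l₂ hL hpop
    have hstay : ∀ x ∈ ([] : List Nat).reverse, arr.getD i 0 ≤ arr.getD x 0 := by simp
    rw [popA, filter_final hL hpop hstay, prevMid_final hL hpop hstay,
      nextMid_final hL hpop hstay]
    rfl
  | cons t rest ih =>
    intro l₂ hL hpop
    have htf : t ∈ filt arr i := by rw [hL]; simp
    rcases mem_filt.mp htf with ⟨hti, hkt⟩
    have htn : t < arr.length := by omega
    have htl₂ : t ∉ l₂ := by
      have hnd := filt_nodup arr i
      rw [hL] at hnd
      have hdisj := (List.nodup_append.mp hnd).2.2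
      exact fun hmem => hdisj t (by simp) t hmem rfl
    rw [popA.eq_def]
    simp only
    by_cases hcond : arr.getD t 0 < arr.getD i 0
    · rw [if_pos hcond]
      have hL' : filt arr i = rest.reverse ++ (t :: l₂) := by
        rw [hL]; simp
      have hpop' : ∀ x ∈ t :: l₂, arr.getD x 0 < arr.getD i 0 := by
        intro x hx
        rcases List.mem_cons.mp hx with rfl | hx
        · exact hcond
        · exact hpop x hx
      have hnext : (nextMid arr i l₂).set t (i : Int) = nextMid arr i (t :: l₂) := by
        unfold nextMid
        rw [set_range_map _ _ htn]
        apply range_map_congr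
        intro j hj
        by_cases hjt : j = t
        · subst hjt
          rw [if_pos rfl, if_pos (Or.inr (by simp))]
          exact (nextIdxB_eq_some hti hi hcond (fun k hk1 hk2 => hkt k hk2 hk1)).symm
        · rw [if_neg hjt]
          exact if_congr (cond_cons _ hjt) rfl rfl
      cases rest with
      | nil =>
        simp only
        have hbot : prevIdxB arr t = -1 := prevIdxB_bottom (by simpa using hL)
        have hprev : prevMid arr i l₂ = prevMid arr i (t :: l₂) := by
          unfold prevMid
          apply range_map_congr
          intro j hj
          by_cases hjt : j = t
          · subst hjt
            rw [if_neg (by rintro (⟨_, hnk⟩ | hmem); exact hnk hkt; exact htl₂ hmem),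
              if_pos (Or.inr (by simp)), hbot]
          · exact if_congr (cond_cons _ hjt) rfl rfl
        rw [hnext, hprev]
        exact ih (t :: l₂) hL' hpop'
      | cons s rest' =>
        simp only
        have hadj : prevIdxB arr t = (s : Int) :=
          prevIdxB_adjacent (l₁ := rest'.reverse) (l₂ := l₂) (by rw [hL]; simp)
        have hprev : (prevMid arr i l₂).set t (s : Int) = prevMid arr i (t :: l₂) := by
          unfold prevMid
          rw [set_range_map _ _ htn]
          apply range_map_congr
          intro j hj
          by_cases hjt : j = t
          · subst hjt
            rw [if_pos rfl, if_pos (Or.inr (by simp)), hadj]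
          · rw [if_neg hjt]
            exact if_congr (cond_cons _ hjt) rfl rfl
        rw [hnext, hprev]
        exact ih (t :: l₂) hL' hpop'
    · rw [if_neg hcond]
      have hstay := stay_all hL (not_lt.mp hcond)
      rw [filter_final hL hpop hstay, prevMid_final hL hpop hstay,
        nextMid_final hL hpop hstay, List.reverse_reverse]

-- after the loop, every index j < n is either popped (¬ keepP) or on the stack (∈ filt);
-- the drain writes prevIdxB for the stack ones too
lemma drain_spec {arr : List Int} :
    ∀ (stack : List Nat) (l₂ : List Nat),
      filt arr arr.length = stack.reverse ++ l₂ →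
      drainA stack (prevMid arr arr.length l₂) =
        (List.range arr.length).map (prevIdxB arr) := by
  intro stack
  induction stack with
  | nil =>
    intro l₂ hL
    rw [drainA]
    unfold prevMid
    apply range_map_congr
    intro j hj
    rw [if_pos ?_]
    by_cases hk : keepP arr arr.length j
    · exact Or.inr (by rw [← List.nil_append l₂, ← List.reverse_nil, ← hL]; exact mem_filt.mpr ⟨hj, hk⟩)
    · exact Or.inl ⟨hj, hk⟩
  | cons t rest ih =>
    intro l₂ hL
    have htf : t ∈ filt arr arr.length := by rw [hL]; simp
    rcases mem_filt.mp htf with ⟨htn, hkt⟩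
    have htl₂ : t ∉ l₂ := by
      have hnd := filt_nodup arr arr.length
      rw [hL] at hnd
      have hdisj := (List.nodup_append.mp hnd).2.2
      exact fun hmem => hdisj t (by simp) t hmem rfl
    have hL' : filt arr arr.length = rest.reverse ++ (t :: l₂) := by
      rw [hL]; simp
    rw [drainA.eq_def]
    simp only
    cases rest with
    | nil =>
      simp only
      have hbot : prevIdxB arr t = -1 := prevIdxB_bottom (by simpa using hL)
      have hprev : prevMid arr arr.length l₂ = prevMid arr arr.length (t :: l₂) := by
        unfold prevMid
        apply range_map_congr
        intro j hj
        by_cases hjt : j = t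
        · subst hjt
          rw [if_neg (by rintro (⟨_, hnk⟩ | hmem); exact hnk hkt; exact htl₂ hmem),
            if_pos (Or.inr (by simp)), hbot]
        · exact if_congr (cond_cons _ hjt) rfl rfl
      rw [hprev]
      exact ih (t :: l₂) hL'
    | cons s rest' =>
      simp only
      have hadj : prevIdxB arr t = (s : Int) :=
        prevIdxB_adjacent (l₁ := rest'.reverse) (l₂ := l₂) (by rw [hL]; simp)
      have hprev : (prevMid arr arr.length l₂).set t (s : Int) =
          prevMid arr arr.length (t :: l₂) := by
        unfold prevMid
        rw [set_range_map _ _ htn]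
        apply range_map_congr
        intro j hj
        by_cases hjt : j = t
        · subst hjt
          rw [if_pos rfl, if_pos (Or.inr (by simp)), hadj]
        · rw [if_neg hjt]
          exact if_congr (cond_cons _ hjt) rfl rfl
      rw [hprev]
      exact ih (t :: l₂) hL'

lemma loop_spec (arr : List Int) (i : Nat) (hi : i ≤ arr.length) :
    (List.range i).foldl (stepA arr)
      ([], List.replicate arr.length (-1 : Int),
        List.replicate arr.length (arr.length : Int)) =
      ((filt arr i).reverse, prevMid arr i [], nextMid arr i []) := by
  induction i with
  | zero =>
    simp only [List.range_zero, List.foldl_nil]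
    have h1 : filt arr 0 = [] := by simp [filt]
    have h2 : prevMid arr 0 [] = List.replicate arr.length (-1 : Int) := by
      unfold prevMid
      apply List.ext_getElem
      · simp
      · intro k hk1 hk2; simp
    have h3 : nextMid arr 0 [] = List.replicate arr.length (arr.length : Int) := by
      unfold nextMid
      apply List.ext_getElem
      · simp
      · intro k hk1 hk2; simp
    rw [h1, h2, h3]
    rfl
  | succ i ih =>
    have hi' : i < arr.length := by omega
    rw [List.range_succ, List.foldl_append, ih (by omega), List.foldl_cons, List.foldl_nil]
    unfold stepA
    rw [popA_spec hi' ((filt arr i).reverse) [] (by simp) (by simp)]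
    rw [filt_succ]
    simp

lemma nextMid_all (arr : List Int) :
    nextMid arr arr.length [] = (List.range arr.length).map (nextIdxB arr) := by
  unfold nextMid
  apply range_map_congr
  intro j hj
  by_cases h : (j < arr.length ∧ ¬ keepP arr arr.length j) ∨ j ∈ ([] : List Nat)
  · rw [if_pos h]
  · rw [if_neg h]
    push_neg at h
    have hk : keepP arr arr.length j := h.1 hj
    exact (nextIdxB_eq_none hj (fun k hk1 hk2 => hk k hk2 hk1)).symm

-- ===== VERDICT (by name: the statement is the Claim_ definition above) =====
theorem dandiaozhan_spec : Claim_equal_dandiaozhan := by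
  intro arr _
  unfold Spec_dandiaozhan
  simp only [dandiaozhan, dandiaozhan_alt]
  rw [loop_spec arr arr.length (le_refl _)]
  rw [drain_spec ((filt arr arr.length).reverse) [] (by simp), nextMid_all]
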